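-- pv_equiv track=rewrite | github.com/keflavich/ALMA_2024.1.01182.S_SgrB2_DS | calibrated_final/image_cubes.py | get_cube_config
-- ===== SOURCE A (Python) =====
-- SOURCE_ORDER = ['SgrB2S_DS1-5', 'DS6', 'DS7-DS8', 'DS9']
--
-- SPWS = ['23', '25', '27', '29']
--
-- def get_cube_config(cube_id):
--     """
--     Get the configuration for a specific cube based on ID.
--
--     Returns (source, spw)
--     """
--     # Create all combinations of sources and SPWs in specified order
--     cube_configs = []
--     for source in SOURCE_ORDER:
--         for spw in SPWS:
--             cube_configs.append((source, spw))
--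
--     if cube_id >= len(cube_configs):
--         raise ValueError(f"cube_id {cube_id} is out of range (0-{len(cube_configs)-1})")
--
--     source, spw = cube_configs[cube_id]
--     return source, spw
-- ===== SOURCE B (Python) =====
-- SOURCE_ORDER = ['SgrB2S_DS1-5', 'DS6', 'DS7-DS8', 'DS9']
--
-- SPWS = ['23', '25', '27', '29']
--
-- def get_cube_config(cube_id):
--     """
--     Get the configuration for a specific cube based on ID.
--
--     Returns (source, spw)
--     """
--     n = len(SOURCE_ORDER) * len(SPWS)
--     if cube_id >= n:
--         raise ValueError(f"cube_id {cube_id} is out of range (0-{n-1})")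
--     s, w = divmod(cube_id, len(SPWS))
--     return SOURCE_ORDER[s], SPWS[w]
-- ===== Notes on version B (the rewrite author's own statement) =====
-- stated objective: simpler
-- what changed: B replaces building the 16-element Cartesian product list and indexing into it by a direct divmod(cube_id, len(SPWS)) arithmetic lookup into the two base lists (negative-index wraparound agrees because 16 is a multiple of 4).
-- outside the precondition, e.g. on get_cube_config(16): A raises ValueError, B raises ValueError; on get_cube_config(-17): A raises IndexError, B raises IndexError
import Mathlib
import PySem

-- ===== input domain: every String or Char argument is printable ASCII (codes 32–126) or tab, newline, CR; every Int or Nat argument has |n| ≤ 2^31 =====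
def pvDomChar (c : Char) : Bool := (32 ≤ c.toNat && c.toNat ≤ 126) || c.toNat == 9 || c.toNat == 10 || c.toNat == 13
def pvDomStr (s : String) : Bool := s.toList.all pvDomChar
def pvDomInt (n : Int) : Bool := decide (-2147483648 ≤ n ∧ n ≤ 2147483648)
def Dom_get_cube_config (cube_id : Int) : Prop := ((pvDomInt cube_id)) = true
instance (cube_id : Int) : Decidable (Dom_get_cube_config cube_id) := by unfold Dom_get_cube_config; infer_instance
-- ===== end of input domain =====

-- B replaces the Cartesian-product table with a direct divmod lookup into the two base lists (simpler).


def SOURCE_ORDER : List String := ["SgrB2S_DS1-5", "DS6", "DS7-DS8", "DS9"]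
def SPWS : List String := ["23", "25", "27", "29"]

-- ===== PORT A =====
-- builds the full Cartesian table, then indexes it (Python list indexing = pyGet?;
-- outside Pre_ the Python raises, so the port's .getD default is never claimed)
def get_cube_config (cube_id : Int) : String × String :=
  let cube_configs : List (String × String) :=
    SOURCE_ORDER.foldl (fun acc source =>
      SPWS.foldl (fun acc spw => acc ++ [(source, spw)]) acc) []
  (PySem.List.pyGet? cube_configs cube_id).getD ("", "")

-- ===== PORT B =====
-- divmod by len(SPWS), then index each base list directly
def get_cube_config_alt (cube_id : Int) : String × String :=
  let s := PySem.Int.floordiv cube_id 4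
  let w := PySem.Int.mod cube_id 4
  ((PySem.List.pyGet? SOURCE_ORDER s).getD "", (PySem.List.pyGet? SPWS w).getD "")

-- ===== PRECONDITION & SPEC =====
-- Pre_ excludes exactly the inputs where A raises: ValueError for cube_id ≥ 16, IndexError for cube_id < -16
def Pre_get_cube_config (cube_id : Int) : Prop := -16 ≤ cube_id ∧ cube_id < 16
instance (cube_id : Int) : Decidable (Pre_get_cube_config cube_id) := by unfold Pre_get_cube_config; infer_instance
def pvWitness_get_cube_config : Int := (5)

def Spec_get_cube_config (cube_id : Int) (out : String × String) : Prop := out = get_cube_config_alt cube_id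
instance (cube_id : Int) (out : String × String) : Decidable (Spec_get_cube_config cube_id out) := by unfold Spec_get_cube_config; infer_instance

-- ===== CLAIM (what is proved, stated in full; the proofs are below) =====
def Claim_equal_get_cube_config : Prop := ∀ (cube_id : Int), Dom_get_cube_config cube_id → Pre_get_cube_config cube_id → Spec_get_cube_config cube_id (get_cube_config cube_id)

-- ===== LEMMAS AND PROOFS =====

-- ===== VERDICT (by name: the statement is the Claim_ definition above) =====
theorem get_cube_config_spec : Claim_equal_get_cube_config := by
  intro cube_id _ hpre
  obtain ⟨h1, h2⟩ := hpre
  unfold Spec_get_cube_config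
  interval_cases cube_id <;> rfl
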